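-- pv_equiv track=rewrite | github.com/Zalthalion/University | 4th Semester/Python/Pollydivisable to base62/PollyDivisable_toBase62.py | is_polydivisible
-- ===== SOURCE A (Python) =====
-- def deciToAny(number, base):
--     '''Function that takes the given number as string and converts it
--         from decimal number base to the given base'''
--
--     a = ("0","1","2","3","4","5","6","7","8","9")
--     b = a + ("A", "B", "C", "D", "E", "F", "G", "H", "I", "J", "K", "L", "M", "N", "O", "P", "Q", "R", "S", "T", "U", "V", "W", "X", "Y", "Z")
--     c = b + ('a', 'b', 'c', 'd', 'e', 'f', 'g', 'h', 'i', 'j', 'k', 'l', 'm', 'n', 'o', 'p', 'q', 'r', 's', 't', 'u', 'v', 'w', 'x', 'y', 'z')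
--     numberDecimal = 0
--
--     numLen = len(number)-1
--     for letter in number:
--         numberDecimal = numberDecimal + (c.index(letter) * base**numLen)
--         numLen+=-1
--
--     return numberDecimal
--
-- def is_polydivisible(number, base):
--     '''Function, that checks if the given number n is a polydivisable number in the given base'''
--
--
--     i = 0
--     j = int(len(str(number)))
--     isPoly = True
--     while i < j:
--
--         if deciToAny(number, base) % int(len(str(number))) != 0:
--             isPoly = False
--             return isPoly
--
--
--         number = number[:-1]
--         i += 1
--
--     return isPoly
-- ===== SOURCE B (Python) =====
-- def is_polydivisible(number, base):
--     '''Single left-to-right pass: build each prefix value incrementally (Horner) and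
--     check divisibility by the prefix length as we go.'''
--     digits = "0123456789ABCDEFGHIJKLMNOPQRSTUVWXYZabcdefghijklmnopqrstuvwxyz"
--     value = 0
--     for length, ch in enumerate(number, 1):
--         value = value * base + digits.index(ch)
--         if value % length != 0:
--             return False
--     return True
-- ===== Notes on version B (the rewrite author's own statement) =====
-- stated objective: faster
-- what changed: A re-converts every truncated copy of the string with deciToAny (recomputing digit indices and base**k powers for each prefix); B makes one left-to-right pass, building each prefix value incrementally by Horner's rule and checking divisibility by the prefix length as it goes.
import Mathlib
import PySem

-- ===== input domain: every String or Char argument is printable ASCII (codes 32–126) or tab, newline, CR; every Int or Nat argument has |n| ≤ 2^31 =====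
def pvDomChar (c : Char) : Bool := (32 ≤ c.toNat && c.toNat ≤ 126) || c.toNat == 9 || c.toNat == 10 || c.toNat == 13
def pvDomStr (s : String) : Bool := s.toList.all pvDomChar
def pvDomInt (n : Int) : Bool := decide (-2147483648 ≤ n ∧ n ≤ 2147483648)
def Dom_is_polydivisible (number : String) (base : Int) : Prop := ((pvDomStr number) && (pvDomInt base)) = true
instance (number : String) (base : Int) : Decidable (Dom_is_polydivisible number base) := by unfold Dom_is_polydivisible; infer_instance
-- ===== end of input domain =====

-- B replaces A's per-prefix re-conversion (recomputing deciToAny for every truncation)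
-- by ONE left-to-right pass that builds each prefix value incrementally (Horner) and
-- checks divisibility by the prefix length as it goes; objective: faster.

-- ===== PORT A =====
-- the tuple c = digits ++ uppercase ++ lowercase from deciToAny
def pvDigitTuple : List Char :=
  "0123456789ABCDEFGHIJKLMNOPQRSTUVWXYZabcdefghijklmnopqrstuvwxyz".toList

-- loop of deciToAny: acc += c.index(letter) * base**numLen; numLen -= 1.
-- none = the ValueError c.index raises when letter is not a digit (excluded by Pre_).
def deciToAnyGo (letters : List Char) (base : Int) (acc : Int) (numLen : Nat) : Option Int :=
  match letters with
  | [] => some acc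
  | ch :: rest =>
    match PySem.List.index? pvDigitTuple ch with
    | none => none
    | some d => deciToAnyGo rest base (acc + (d : Int) * base ^ numLen) (numLen - 1)

def deciToAny (number : List Char) (base : Int) : Option Int :=
  deciToAnyGo number base 0 (number.length - 1)

-- the while loop of is_polydivisible: runs j - i more times, chopping the last char
def polyLoop (cur : List Char) (base : Int) : Nat → Bool
  | 0 => true
  | k + 1 =>
    match deciToAny cur base with
    | none => false    -- Python raises ValueError here (outside Pre_)
    | some v =>
      if PySem.Int.mod v (cur.length : Int) ≠ 0 then false
      else polyLoop cur.dropLast base k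

def is_polydivisible (number : String) (base : Int) : Bool :=
  polyLoop number.toList base number.toList.length

-- ===== PORT B =====
-- single pass: value = value*base + digits.index(ch); check value % length == 0
def altGo (letters : List Char) (base : Int) (value : Int) (length : Nat) : Bool :=
  match letters with
  | [] => true
  | ch :: rest =>
    match PySem.List.index? pvDigitTuple ch with
    | none => false    -- Python raises ValueError here (outside Pre_)
    | some d =>
      let value' := value * base + (d : Int)
      if PySem.Int.mod value' (length : Int) ≠ 0 then false
      else altGo rest base value' (length + 1)

def is_polydivisible_alt (number : String) (base : Int) : Bool :=
  altGo number.toList base 0 1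

-- ===== PRECONDITION & SPEC =====
-- A raises ValueError (via tuple.index in deciToAny) iff some character of number is
-- not one of the 62 base-62 digits 0-9A-Za-z; Pre_ excludes exactly those inputs.
def Pre_is_polydivisible (number : String) (_base : Int) : Prop :=
  number.toList.all (fun c => pvDigitTuple.contains c) = true
instance (number : String) (base : Int) : Decidable (Pre_is_polydivisible number base) := by
  unfold Pre_is_polydivisible; infer_instance

def pvWitness_is_polydivisible : String × Int := ("1232", 4)

def Spec_is_polydivisible (number : String) (base : Int) (out : Bool) : Prop := out = is_polydivisible_alt number base
instance (number : String) (base : Int) (out : Bool) : Decidable (Spec_is_polydivisible number base out) := by unfold Spec_is_polydivisible; infer_instance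

-- ===== CLAIM (what is proved, stated in full; the proofs are below) =====
def Claim_equal_is_polydivisible : Prop := ∀ (number : String) (base : Int), Dom_is_polydivisible number base → Pre_is_polydivisible number base → Spec_is_polydivisible number base (is_polydivisible number base)

-- ===== LEMMAS AND PROOFS =====

-- mathematical value of a digit string: positional (most significant first)
def digitVal (c : Char) : Option Int :=
  (PySem.List.index? pvDigitTuple c).map (fun n => (n : Int))

def posVal (base : Int) : List Char → Option Int
  | [] => some 0
  | c :: r =>
    match digitVal c, posVal base r with
    | some d, some s => some (d * base ^ r.length + s)
    | _, _ => none

-- one prefix check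
def prefixOK (base : Int) (p : List Char) : Bool :=
  match posVal base p with
  | none => false
  | some v => PySem.Int.mod v (p.length : Int) == 0

lemma all_congr' {α : Type} {l : List α} {p q : α → Bool}
    (h : ∀ a ∈ l, p a = q a) : l.all p = l.all q := by
  induction l with
  | nil => rfl
  | cons x xs ih =>
    simp only [List.all_cons, h x (by simp), ih (fun a ha => h a (by simp [ha]))]

lemma deciToAnyGo_eq (base : Int) :
    ∀ (letters : List Char) (acc : Int) (numLen : Nat),
      numLen = letters.length - 1 →
      deciToAnyGo letters base acc numLen = (posVal base letters).map (acc + ·) := by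
  intro letters
  induction letters with
  | nil => intro acc numLen _; simp [deciToAnyGo, posVal]
  | cons c r ih =>
    intro acc numLen h
    have hn : numLen = r.length := by simp at h; omega
    simp only [deciToAnyGo, posVal, digitVal]
    cases hidx : PySem.List.index? pvDigitTuple c with
    | none => simp
    | some d =>
      dsimp only
      rw [ih _ (numLen - 1) (by omega)]
      cases hp : posVal base r with
      | none => simp
      | some s =>
        simp only [Option.map_some, hn]
        congr 1
        ring

lemma deciToAny_eq (number : List Char) (base : Int) :
    deciToAny number base = posVal base number := by
  rw [deciToAny, deciToAnyGo_eq base number 0 _ rfl]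
  cases posVal base number <;> simp

-- posVal on a snoc (the Horner step)
lemma posVal_snoc (base : Int) (p : List Char) (c : Char) :
    posVal base (p ++ [c]) =
      (posVal base p).bind (fun v => (digitVal c).map (fun d => v * base + d)) := by
  induction p with
  | nil => cases h : digitVal c <;> simp [posVal, h]
  | cons x r ih =>
    simp only [List.cons_append, posVal, ih]
    cases hx : digitVal x with
    | none => simp
    | some dx =>
      cases hr : posVal base r with
      | none => simp
      | some s =>
        cases hc : digitVal c with
        | none => simp
        | some d =>
          simp only [Option.bind_some, Option.map_some, List.length_append,
            List.length_cons, List.length_nil]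
          congr 1
          ring

-- the common specification: every nonempty prefix passes its divisibility check
def allOK (base : Int) (chars : List Char) : Bool :=
  (List.range chars.length).all (fun k => prefixOK base (chars.take (k + 1)))

-- one step of A's while loop
lemma polyLoop_succ (base : Int) (cur : List Char) (k : Nat) :
    polyLoop cur base (k + 1) = (prefixOK base cur && polyLoop cur.dropLast base k) := by
  simp only [polyLoop, deciToAny_eq, prefixOK]
  cases hp : posVal base cur with
  | none => rfl
  | some v =>
    by_cases hm : PySem.Int.mod v ((cur.length : Int)) = 0 <;> simp [hm]

-- A computes allOK
lemma polyLoop_eq (base : Int) :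
    ∀ (n : Nat) (cur : List Char), cur.length = n →
      polyLoop cur base n = allOK base cur := by
  intro n
  induction n with
  | zero =>
    intro cur h
    simp [polyLoop, allOK, List.length_eq_zero_iff.mp h]
  | succ k ih =>
    intro cur h
    have hcur : cur.take (k + 1) = cur := by
      rw [List.take_of_length_le (by omega)]
    simp only [allOK, h, List.range_succ, List.all_append, List.all_cons,
      List.all_nil, hcur]
    have hrest : polyLoop cur.dropLast base k = (List.range k).all
        (fun j => prefixOK base (cur.take (j + 1))) := by
      rw [ih cur.dropLast (by simp [h])]
      unfold allOK
      have hlen : cur.dropLast.length = k := by simp [h]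
      rw [hlen]
      apply all_congr'
      intro j hj
      have hj' : j < k := List.mem_range.mp hj
      rw [List.dropLast_eq_take, List.take_take]
      congr 2
      omega
    rw [polyLoop_succ, hrest]
    cases prefixOK base cur <;> simp [Bool.and_comm]

-- B computes allOK (loop invariant: value is the value of the consumed prefix)
lemma altGo_eq (base : Int) :
    ∀ (rest pref : List Char) (v : Int),
      posVal base pref = some v →
      altGo rest base v (pref.length + 1) =
        (List.range rest.length).all (fun j => prefixOK base (pref ++ rest.take (j + 1))) := by
  intro rest
  induction rest with
  | nil => intro pref v _; simp [altGo]
  | cons c r ih =>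
    intro pref v hv
    simp only [altGo]
    have hsnoc := posVal_snoc base pref c
    rw [hv, Option.bind_some] at hsnoc
    have htake0 : (pref ++ (c :: r).take (0 + 1)) = pref ++ [c] := by simp
    have hstep : ∀ j, (pref ++ (c :: r).take (j + 1 + 1)) =
        (pref ++ [c]) ++ r.take (j + 1) := by
      intro j; simp [List.take_succ_cons]
    have hlen : (pref ++ [c]).length = pref.length + 1 := by simp
    simp only [List.length_cons, List.range_succ_eq_map, List.all_cons, List.all_map]
    cases hidx : PySem.List.index? pvDigitTuple c with
    | none =>
      have hd : digitVal c = none := by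
        simp only [digitVal]; rw [hidx]; rfl
      rw [hd] at hsnoc
      simp only [Option.map_none] at hsnoc
      rw [show prefixOK base (pref ++ (c :: r).take (0 + 1)) = false from by
        rw [htake0]; simp [prefixOK, hsnoc]]
      simp only [Bool.false_and]
    | some d =>
      have hd : digitVal c = some d := by
        simp only [digitVal]; rw [hidx]; rfl
      rw [hd] at hsnoc
      replace hsnoc : posVal base (pref ++ [c]) = some (v * base + (d : Int)) := by
        rw [hsnoc]; rfl
      dsimp only
      by_cases hm : PySem.Int.mod (v * base + (d : Int)) ((pref.length : Int) + 1) = 0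
      · rw [show prefixOK base (pref ++ (c :: r).take (0 + 1)) = true from by
          rw [htake0]
          simp only [prefixOK, hsnoc, hlen, Nat.cast_add, Nat.cast_one]
          rw [hm]; rfl]
        have hrec := ih (pref ++ [c]) (v * base + (d : Int)) hsnoc
        rw [hlen] at hrec
        rw [if_neg (by rw [Nat.cast_add, Nat.cast_one, hm]; simp), hrec, Bool.true_and]
        apply all_congr'
        intro j _
        simp only [Function.comp, Nat.succ_eq_add_one]
        rw [hstep j]
      · rw [show prefixOK base (pref ++ (c :: r).take (0 + 1)) = false from by
          rw [htake0]
          simp only [prefixOK, hsnoc, hlen, Nat.cast_add, Nat.cast_one]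
          exact beq_eq_false_iff_ne.mpr hm]
        rw [if_pos (by rw [Nat.cast_add, Nat.cast_one]; exact hm)]
        simp only [Bool.false_and]

-- ===== VERDICT (by name: the statement is the Claim_ definition above) =====
theorem is_polydivisible_spec : Claim_equal_is_polydivisible := by
  intro number base _ _
  unfold Spec_is_polydivisible is_polydivisible is_polydivisible_alt
  rw [polyLoop_eq base number.toList.length number.toList rfl]
  have halt := altGo_eq base number.toList [] 0 (by simp [posVal])
  simp only [List.length_nil, List.nil_append, List.length_nil] at halt
  rw [show (0:Nat) + 1 = 1 from rfl] at halt
  rw [halt]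
  unfold allOK
  rfl
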